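-- pv_equiv track=rewrite | github.com/MineTime23/Algorithm | 프로그래머스/lv2/42586. 기능개발/기능개발.py | solution
-- ===== SOURCE A (Python) =====
-- from collections import Counter
--
-- def solution(progresses, speeds):
--     progresses = list(map(lambda x : 100 - x, progresses))
--     progresses = [ progresses[i]//speeds[i] if progresses[i] % speeds[i] == 0 else progresses[i]//speeds[i] + 1 for i in range(len(progresses))]
--
--     for i in range(len(progresses)):
--         if i == 0:
--             continue
--         else:
--             if progresses[i] < progresses[i-1]:
--                 progresses[i] = progresses[i-1]
--     return list(Counter(progresses).values())
-- ===== SOURCE B (Python) =====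
-- def solution(progresses, speeds):
--     answer = []
--     leader = 0
--     count = 0
--     for p, s in zip(progresses, speeds):
--         d = -((p - 100) // s)  # ceil((100 - p) / s) with integer arithmetic
--         if count == 0 or d > leader:
--             if count:
--                 answer.append(count)
--             leader = d
--             count = 1
--         else:
--             count += 1
--     if count:
--         answer.append(count)
--     return answer
-- ===== Notes on version B (the rewrite author's own statement) =====
-- stated objective: simpler
-- what changed: Replaces the three-pass pipeline (days map, in-place running-max rewrite of the list, Counter) by a single fold over zip(progresses, speeds) keeping only the current batch leader and a running count; one traversal and no intermediate lists/Counter gives a constant-factor speedup.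
import Mathlib
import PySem

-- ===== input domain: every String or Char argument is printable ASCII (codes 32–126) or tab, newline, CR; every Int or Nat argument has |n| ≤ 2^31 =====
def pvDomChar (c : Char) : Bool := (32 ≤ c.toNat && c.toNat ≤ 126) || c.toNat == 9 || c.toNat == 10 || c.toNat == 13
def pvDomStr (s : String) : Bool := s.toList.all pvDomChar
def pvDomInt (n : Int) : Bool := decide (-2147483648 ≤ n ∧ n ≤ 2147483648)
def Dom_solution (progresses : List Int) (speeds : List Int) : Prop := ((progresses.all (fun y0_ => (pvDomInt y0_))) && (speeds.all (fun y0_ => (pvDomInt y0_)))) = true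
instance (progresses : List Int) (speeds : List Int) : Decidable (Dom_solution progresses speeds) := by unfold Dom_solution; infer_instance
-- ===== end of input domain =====

-- B replaces A's three passes (days map, in-place running-max rewrite, Counter) by one
-- fold over zip(progresses, speeds) keeping only the current batch leader and a count.

-- ===== PORT A =====
-- the in-place loop 'if progresses[i] < progresses[i-1]: progresses[i] = progresses[i-1]',
-- transcribed as structural recursion carrying the previous (already rewritten) element
def runMaxGo (prev : Int) : List Int → List Int
  | [] => []
  | y :: ys => (if y < prev then prev else y) :: runMaxGo (if y < prev then prev else y) ys

def runMaxA : List Int → List Int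
  | [] => []
  | x :: xs => x :: runMaxGo x xs

def solution (progresses : List Int) (speeds : List Int) : List Int :=
  let p1 := progresses.map (fun x => 100 - x)
  let p2 := (PySem.List.pyRange 0 (p1.length : Int) 1).map (fun i =>
    if PySem.Int.mod (PySem.List.pyGetD p1 i 0) (PySem.List.pyGetD speeds i 0) = 0
    then PySem.Int.floordiv (PySem.List.pyGetD p1 i 0) (PySem.List.pyGetD speeds i 0)
    else PySem.Int.floordiv (PySem.List.pyGetD p1 i 0) (PySem.List.pyGetD speeds i 0) + 1)
  (PySem.Dict.counter (runMaxA p2)).values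

-- ===== PORT B =====
def solution_alt (progresses : List Int) (speeds : List Int) : List Int :=
  let fin := (progresses.zip speeds).foldl
    (fun (st : List Int × Int × Int) ps =>
      let d := -(PySem.Int.floordiv (ps.1 - 100) ps.2)
      if st.2.2 = 0 ∨ st.2.1 < d then
        ((if st.2.2 ≠ 0 then st.1 ++ [st.2.2] else st.1), d, 1)
      else (st.1, st.2.1, st.2.2 + 1))
    ([], 0, 0)
  if fin.2.2 ≠ 0 then fin.1 ++ [fin.2.2] else fin.1

-- ===== PRECONDITION & SPEC =====
-- Pre_ excludes exactly the raising inputs: speeds shorter than progresses (IndexError on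
-- speeds[i]) and a zero among the speeds A actually divides by (ZeroDivisionError).
def Pre_solution (progresses : List Int) (speeds : List Int) : Prop :=
  progresses.length ≤ speeds.length ∧ ∀ s ∈ speeds.take progresses.length, s ≠ 0
instance (progresses : List Int) (speeds : List Int) : Decidable (Pre_solution progresses speeds) := by unfold Pre_solution; infer_instance

def pvWitness_solution : List Int × List Int := ([93, 30, 55], [1, 30, 5])

def Spec_solution (progresses : List Int) (speeds : List Int) (out : List Int) : Prop := out = solution_alt progresses speeds
instance (progresses : List Int) (speeds : List Int) (out : List Int) : Decidable (Spec_solution progresses speeds out) := by unfold Spec_solution; infer_instance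

-- ===== CLAIM (what is proved, stated in full; the proofs are below) =====
def Claim_equal_solution : Prop := ∀ (progresses : List Int) (speeds : List Int), Dom_solution progresses speeds → Pre_solution progresses speeds → Spec_solution progresses speeds (solution progresses speeds)

-- ===== LEMMAS AND PROOFS =====

-- the per-feature ceiling division: B's -((p-100)//s) equals A's remainder-tested form
theorem ceil_div_eq (a s : Int) (h : s ≠ 0) :
    -(PySem.Int.floordiv (-a) s) = if PySem.Int.mod a s = 0 then PySem.Int.floordiv a s else PySem.Int.floordiv a s + 1 := by
  have hsgn : s.sign = if 0 < s then 1 else -1 := by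
    rcases lt_trichotomy s 0 with h1 | h1 | h1
    · simp [Int.sign_eq_neg_one_iff_neg.mpr h1]; omega
    · exact absurd h1 h
    · simp [Int.sign_eq_one_iff_pos.mpr h1]; omega
  by_cases hd : s ∣ a <;>
    simp only [PySem.Int.mod_eq_zero_iff_dvd, hd, if_true, if_false, PySem.Int.floordiv,
      @Int.fdiv_eq_ediv a s, @Int.fdiv_eq_ediv (-a) s, @Int.neg_ediv a s, dvd_neg,
      or_true, or_false, if_true, if_false] <;>
    (try rw [hsgn]) <;> (try split_ifs) <;> omega

-- run lengths of the (nondecreasing) running-max list, shared spec for both sides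
def cvals (L c : Int) : List Int → List Int
  | [] => [c]
  | d :: ds => if L < d then c :: cvals d 1 ds else cvals L (c + 1) ds

theorem runMaxGo_ge (ds : List Int) : ∀ L, ∀ x ∈ runMaxGo L ds, L ≤ x := by
  induction ds with
  | nil => intro L x hx; simp [runMaxGo] at hx
  | cons y ys ih =>
    intro L x hx
    simp only [runMaxGo, List.mem_cons] at hx
    rcases hx with h | h
    · subst h; split <;> omega
    · have := ih (if y < L then L else y) x h
      split at this <;> omega

theorem foldl_add_seed (rest : List Int) : ∀ s t : List Int, (∀ a ∈ rest, a ∉ s) →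
    List.foldl PySem.Set.add (s ++ t) rest = s ++ List.foldl PySem.Set.add t rest := by
  induction rest with
  | nil => intro s t _; simp
  | cons a as ih =>
    intro s t h
    have ha : a ∉ s := h a (by simp)
    have hcon : PySem.Set.contains (s ++ t) a = PySem.Set.contains t a := by
      simp [PySem.Set.contains, ha]
    simp only [List.foldl_cons, PySem.Set.add, hcon]
    by_cases hc : PySem.Set.contains t a = true
    · simp only [hc, if_true]
      exact ih s t (fun b hb => h b (by simp [hb]))
    · simp only [hc, List.append_assoc]
      exact ih s (t ++ [a]) (fun b hb => h b (by simp [hb]))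

theorem ofList_replicate (c : Nat) (hc : 1 ≤ c) (L : Int) :
    PySem.Set.ofList (List.replicate c L) = [L] := by
  induction c with
  | zero => omega
  | succ n ih =>
    rcases Nat.eq_or_lt_of_le hc with h | h
    · simp [← h, PySem.Set.ofList, PySem.Set.add, PySem.Set.empty, PySem.Set.contains]
    · have hn : 1 ≤ n := by omega
      have : List.replicate (n + 1) L = List.replicate n L ++ [L] := by
        simp [List.replicate_succ']
      rw [PySem.Set.ofList] at *
      rw [this, List.foldl_append, ih hn]
      simp [PySem.Set.add, PySem.Set.contains]

theorem ofList_replicate_append (c : Nat) (hc : 1 ≤ c) (L : Int) (rest : List Int)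
    (h : ∀ a ∈ rest, a ≠ L) :
    PySem.Set.ofList (List.replicate c L ++ rest)
      = L :: PySem.Set.ofList rest := by
  rw [PySem.Set.ofList, List.foldl_append]
  have h1 : List.foldl PySem.Set.add PySem.Set.empty (List.replicate c L) = [L] :=
    ofList_replicate c hc L
  rw [h1]
  have := foldl_add_seed rest [L] [] (by intro a ha; simp [h a ha])
  simpa [PySem.Set.ofList] using this

theorem counter_runMax (ds : List Int) : ∀ (L : Int) (c : Nat), 1 ≤ c →
    (PySem.Set.ofList (List.replicate c L ++ runMaxGo L ds)).map
      (fun k => (((List.replicate c L ++ runMaxGo L ds).count k : Nat) : Int))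
    = cvals L (c : Int) ds := by
  induction ds with
  | nil =>
    intro L c hc
    simp only [runMaxGo, List.append_nil]
    rw [ofList_replicate c hc L]
    simp [cvals, List.count_replicate]
  | cons y ys ih =>
    intro L c hc
    by_cases hy : L < y
    · -- new batch
      have hrw : runMaxGo L (y :: ys) = y :: runMaxGo y ys := by
        have hy' : ¬ y < L := by omega
        simp [runMaxGo, hy']
      have hge : ∀ a ∈ y :: runMaxGo y ys, a ≠ L := by
        intro a ha
        rcases List.mem_cons.mp ha with h | h
        · omega
        · have := runMaxGo_ge ys y a h; omega
      rw [hrw, ofList_replicate_append c hc L _ hge]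
      have hLnot : L ∉ y :: runMaxGo y ys := fun h => hge L h rfl
      have hcountL : (List.replicate c L ++ y :: runMaxGo y ys).count L = c := by
        rw [List.count_append, List.count_replicate]
        simp [List.count_eq_zero.mpr hLnot]
      have hmap : (PySem.Set.ofList (y :: runMaxGo y ys)).map
          (fun k => (((List.replicate c L ++ y :: runMaxGo y ys).count k : Nat) : Int))
          = (PySem.Set.ofList (y :: runMaxGo y ys)).map
          (fun k => (((y :: runMaxGo y ys).count k : Nat) : Int)) := by
        apply List.map_congr_left
        intro k hk
        have hk' : k ∈ y :: runMaxGo y ys := (PySem.Set.mem_ofList _ _).mp hk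
        have hkL : k ≠ L := hge k hk'
        rw [List.count_append, List.count_replicate]
        have hb1 : ¬ (L = k) := fun h => hkL h.symm
        simp [hb1]
      have hih := ih y 1 (by omega)
      simp only [List.replicate_one, List.singleton_append] at hih
      rw [List.map_cons, hcountL, hmap, hih]
      simp [cvals, hy]
    · -- same batch
      have hrw : runMaxGo L (y :: ys) = L :: runMaxGo L ys := by
        have : (if y < L then L else y) = L := by split <;> omega
        simp [runMaxGo, this]
      have hsplit : List.replicate c L ++ L :: runMaxGo L ys
          = List.replicate (c + 1) L ++ runMaxGo L ys := by
        rw [List.replicate_succ', List.append_assoc]; rfl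
      rw [hrw, hsplit]
      have := ih L (c + 1) (by omega)
      rw [this]
      have : cvals L (↑(c + 1)) ys = cvals L (↑c + 1) ys := by push_cast; ring_nf
      rw [this]
      simp [cvals, hy]

-- B's fold, restated over the list of day values
def stepB (st : List Int × Int × Int) (d : Int) : List Int × Int × Int :=
  if st.2.2 = 0 ∨ st.2.1 < d then
    ((if st.2.2 ≠ 0 then st.1 ++ [st.2.2] else st.1), d, 1)
  else (st.1, st.2.1, st.2.2 + 1)

def finishB (st : List Int × Int × Int) : List Int :=
  if st.2.2 ≠ 0 then st.1 ++ [st.2.2] else st.1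

theorem foldB_cvals (ds : List Int) : ∀ (ans : List Int) (L c : Int), 1 ≤ c →
    finishB (ds.foldl stepB (ans, L, c)) = ans ++ cvals L c ds := by
  induction ds with
  | nil =>
    intro ans L c hc
    have hc' : c ≠ 0 := by omega
    simp [finishB, cvals, hc']
  | cons d ds ih =>
    intro ans L c hc
    have hc' : c ≠ 0 := by omega
    by_cases hd : L < d
    · have : stepB (ans, L, c) d = (ans ++ [c], d, 1) := by
        simp [stepB, hd, hc']
      rw [List.foldl_cons, this, ih (ans ++ [c]) d 1 (by omega)]
      simp [cvals, hd]
    · have hcond : ¬ (c = 0 ∨ L < d) := by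
        intro h; rcases h with h | h
        · exact hc' h
        · exact hd h
      have : stepB (ans, L, c) d = (ans, L, c + 1) := by
        simp [stepB, hcond]
      rw [List.foldl_cons, this, ih ans L (c + 1) (by omega)]
      simp [cvals, hd]

-- A's day list equals B's day list under Pre_
theorem days_eq (progresses speeds : List Int)
    (h1 : progresses.length ≤ speeds.length)
    (h2 : ∀ s ∈ speeds.take progresses.length, s ≠ 0) :
    (PySem.List.pyRange 0 ((progresses.map (fun x => 100 - x)).length : Int) 1).map (fun i =>
      if PySem.Int.mod (PySem.List.pyGetD (progresses.map (fun x => 100 - x)) i 0) (PySem.List.pyGetD speeds i 0) = 0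
      then PySem.Int.floordiv (PySem.List.pyGetD (progresses.map (fun x => 100 - x)) i 0) (PySem.List.pyGetD speeds i 0)
      else PySem.Int.floordiv (PySem.List.pyGetD (progresses.map (fun x => 100 - x)) i 0) (PySem.List.pyGetD speeds i 0) + 1)
    = (progresses.zip speeds).map (fun ps => -(PySem.Int.floordiv (ps.1 - 100) ps.2)) := by
  rw [List.length_map, PySem.List.pyRange_zero_natCast, List.map_map]
  apply List.ext_getElem
  · simp; omega
  · intro k hk1 hk2
    simp only [List.getElem_map, List.getElem_range, Function.comp_apply]
    have hkp : k < progresses.length := by simpa using hk1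
    have hks : k < speeds.length := by omega
    have hsk : speeds[k] ≠ 0 := by
      apply h2
      rw [List.mem_take_iff_getElem]
      exact ⟨k, by omega, by simp⟩
    have e1 : PySem.List.pyGetD (progresses.map (fun x => 100 - x)) (k : Int) 0
        = 100 - progresses[k] := by
      rw [PySem.List.pyGetD_natCast]
      simp [List.getD_eq_getElem?_getD, hkp]
    have e2 : PySem.List.pyGetD speeds (k : Int) 0 = speeds[k] := by
      rw [PySem.List.pyGetD_natCast]
      simp [List.getD_eq_getElem?_getD, hks]
    rw [e1, e2, List.getElem_zip]
    have := ceil_div_eq (100 - progresses[k]) speeds[k] hsk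
    have hneg : progresses[k] - 100 = -(100 - progresses[k]) := by ring
    rw [hneg, this]

theorem counter_values_eq (m : List Int) :
    (PySem.Dict.counter m).values
      = (PySem.Set.ofList m).map (fun k => ((m.count k : Nat) : Int)) := by
  rw [PySem.Dict.values, PySem.Dict.items_counter, List.map_map]
  rfl

-- ===== VERDICT (by name: the statement is the Claim_ definition above) =====
theorem solution_spec : Claim_equal_solution := by
  intro progresses speeds _ hpre
  obtain ⟨h1, h2⟩ := hpre
  unfold Spec_solution
  simp only [solution, solution_alt]
  rw [days_eq progresses speeds h1 h2]
  have hfold : ∀ init, (progresses.zip speeds).foldl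
      (fun (st : List Int × Int × Int) ps =>
        let d := -(PySem.Int.floordiv (ps.1 - 100) ps.2)
        if st.2.2 = 0 ∨ st.2.1 < d then
          ((if st.2.2 ≠ 0 then st.1 ++ [st.2.2] else st.1), d, 1)
        else (st.1, st.2.1, st.2.2 + 1)) init
      = ((progresses.zip speeds).map (fun ps => -(PySem.Int.floordiv (ps.1 - 100) ps.2))).foldl stepB init := by
    intro init
    rw [List.foldl_map]
    rfl
  rw [hfold]
  generalize ((progresses.zip speeds).map (fun ps => -(PySem.Int.floordiv (ps.1 - 100) ps.2))) = days
  cases days with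
  | nil => simp [runMaxA, counter_values_eq, PySem.Set.ofList]
  | cons d ds =>
    have hA : (PySem.Dict.counter (runMaxA (d :: ds))).values = cvals d 1 ds := by
      rw [counter_values_eq]
      have := counter_runMax ds d 1 (by omega)
      simpa using this
    have hstep : stepB ([], 0, 0) d = ([], d, 1) := by simp [stepB]
    have hB := foldB_cvals ds [] d 1 (by omega)
    rw [hA, List.foldl_cons, hstep]
    have hfin : finishB (ds.foldl stepB ([], d, 1)) = cvals d 1 ds := by
      rw [hB]; simp
    exact hfin.symm
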